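-- pv_equiv track=rewrite | github.com/aeromechanic000/minecraft-ai-python | world.py | get_top_k_similar_items
-- ===== SOURCE A (Python) =====
-- def get_top_k_similar_items(target, items, k = 1, threshold = -1) :
--     common_letter_counts = []
--     for item in items :
--         common_letters = set(target).intersection(set(item))
--         if len(common_letters) > threshold :
--             count = len(common_letters)
--             common_letter_counts.append((item, count))
--
--     common_letter_counts.sort(key=lambda x: x[1], reverse=True)
--     top_k_items = [item[0] for item in common_letter_counts[:k]]
--     return top_k_items
-- ===== SOURCE B (Python) =====
-- def get_top_k_similar_items(target, items, k=1, threshold=-1):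
--     tset = set(target)
--     buckets = [[] for _ in range(len(tset) + 1)]
--     for item in items:
--         count = len(tset.intersection(item))
--         if count > threshold:
--             buckets[count].append(item)
--     ordered = []
--     for bucket in reversed(buckets):
--         ordered.extend(bucket)
--     return ordered[:k]
-- ===== Notes on version B (the rewrite author's own statement) =====
-- stated objective: faster
-- what changed: Replaces the build-pairs + stable descending sort + slice with a single counting pass that drops each kept item into a per-count bucket (counts are bounded by |set(target)|), then concatenates buckets from highest count down; set(target) is built once instead of once per item.
import Mathlib
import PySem

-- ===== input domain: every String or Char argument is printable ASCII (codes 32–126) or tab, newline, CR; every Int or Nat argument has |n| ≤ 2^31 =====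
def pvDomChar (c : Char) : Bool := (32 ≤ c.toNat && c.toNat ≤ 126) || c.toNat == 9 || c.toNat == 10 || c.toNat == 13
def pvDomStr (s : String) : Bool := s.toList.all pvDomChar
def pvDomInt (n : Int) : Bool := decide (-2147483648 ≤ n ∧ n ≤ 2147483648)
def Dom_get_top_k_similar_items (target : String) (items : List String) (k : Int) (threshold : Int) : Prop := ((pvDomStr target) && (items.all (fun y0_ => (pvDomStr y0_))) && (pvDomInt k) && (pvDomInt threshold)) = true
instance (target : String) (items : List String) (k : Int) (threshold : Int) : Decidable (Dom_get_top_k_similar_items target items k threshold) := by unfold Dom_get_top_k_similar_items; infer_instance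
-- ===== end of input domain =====

-- B replaces the build-pairs + stable descending sort + slice with a single counting pass into
-- per-count buckets (counts are bounded by |set(target)|), concatenated from the highest count down;
-- objective: faster (no comparison sort, set(target) built once instead of per item).

-- ===== PORT A =====
def get_top_k_similar_items (target : String) (items : List String) (k : Int) (threshold : Int) : List String :=
  let common_letter_counts : List (String × Int) :=
    items.foldl (fun acc item =>
      let common_letters := PySem.Set.inter (PySem.Set.ofList target.toList) (PySem.Set.ofList item.toList)
      if (common_letters.length : Int) > threshold then
        acc ++ [(item, (common_letters.length : Int))]
      else acc) []
  let sortedCounts := PySem.List.sorted common_letter_counts (fun x => x.2) true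
  (PySem.List.slice sortedCounts none (some k)).map (fun item => item.1)

-- ===== PORT B =====
def get_top_k_similar_items_alt (target : String) (items : List String) (k : Int) (threshold : Int) : List String :=
  let tset : PySem.Set Char := PySem.Set.ofList target.toList
  let buckets0 : List (List String) := (List.range (tset.length + 1)).map (fun _ => [])
  let buckets := items.foldl (fun bs item =>
      let count := (PySem.Set.inter tset item.toList).length
      if (count : Int) > threshold then bs.modify count (fun b => b ++ [item]) else bs) buckets0
  let ordered := buckets.reverse.foldl (fun acc bucket => acc ++ bucket) []
  PySem.List.slice ordered none (some k)

-- ===== PRECONDITION & SPEC =====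
def Spec_get_top_k_similar_items (target : String) (items : List String) (k : Int) (threshold : Int) (out : List String) : Prop := out = get_top_k_similar_items_alt target items k threshold
instance (target : String) (items : List String) (k : Int) (threshold : Int) (out : List String) : Decidable (Spec_get_top_k_similar_items target items k threshold out) := by unfold Spec_get_top_k_similar_items; infer_instance

-- ===== CLAIM (what is proved, stated in full; the proofs are below) =====
def Claim_equal_get_top_k_similar_items : Prop := ∀ (target : String) (items : List String) (k : Int) (threshold : Int), Dom_get_top_k_similar_items target items k threshold → Spec_get_top_k_similar_items target items k threshold (get_top_k_similar_items target items k threshold)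

-- ===== LEMMAS AND PROOFS =====

-- the per-item count both programs use (A's form; B's form is proved equal below)
def pvCnt (target : String) (item : String) : Nat :=
  (PySem.Set.inter (PySem.Set.ofList target.toList) (PySem.Set.ofList item.toList)).length

-- descending concatenation of the c-key buckets of a pair list: bucketedP N L = filter(key=N) ++ … ++ filter(key=0)
def bucketedP (N : Nat) (L : List (String × Int)) : List (String × Int) :=
  match N with
  | 0 => L.filter (fun p => p.2 == (0 : Int))
  | Nat.succ n => L.filter (fun p => p.2 == ((n + 1 : Nat) : Int)) ++ bucketedP n L

lemma bucketedP_nil (N : Nat) : bucketedP N [] = [] := by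
  induction N with
  | zero => rfl
  | succ n ih => simp [bucketedP, ih]

lemma mem_bucketedP {N : Nat} {L : List (String × Int)} {y : String × Int}
    (h : y ∈ bucketedP N L) : y ∈ L ∧ y.2 ≤ (N : Int) := by
  induction N with
  | zero =>
    simp only [bucketedP, List.mem_filter] at h
    exact ⟨h.1, by simpa using le_of_eq (by exact_mod_cast (beq_iff_eq.mp h.2))⟩
  | succ n ih =>
    simp only [bucketedP, List.mem_append, List.mem_filter] at h
    rcases h with ⟨hy, hk⟩ | h
    · exact ⟨hy, by push_cast; exact le_of_eq (by exact_mod_cast (beq_iff_eq.mp hk))⟩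
    · rcases ih h with ⟨hy, hk⟩
      exact ⟨hy, le_trans hk (by push_cast; omega)⟩

lemma bucketedP_append_of_gt {N : Nat} {L : List (String × Int)} {x : String × Int}
    (h : (N : Int) < x.2) : bucketedP N (L ++ [x]) = bucketedP N L := by
  induction N with
  | zero =>
    simp only [bucketedP, List.filter_append]
    have : (x.2 == (0 : Int)) = false := by simp; omega
    simp [List.filter, this]
  | succ n ih =>
    have h' : (n : Int) < x.2 := by push_cast at h ⊢; omega
    simp only [bucketedP, List.filter_append, ih h']
    have hne : (x.2 == ((n : Int) + 1)) = false := by simp; push_cast at h; omega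
    simp [List.filter, hne]

lemma insertBy_append_left {α : Type} (before : α → α → Bool) (x : α) (pre suf : List α)
    (h : ∀ y ∈ pre, before x y = false) :
    PySem.List.insertBy before x (pre ++ suf) = pre ++ PySem.List.insertBy before x suf := by
  induction pre with
  | nil => simp
  | cons y ys ih =>
    have hy : before x y = false := h y (by simp)
    simp only [List.cons_append, PySem.List.insertBy, hy]
    simp only [Bool.false_eq_true, if_false]
    rw [ih (fun z hz => h z (by simp [hz]))]

lemma insertBy_head {α : Type} (before : α → α → Bool) (x : α) (l : List α)
    (h : ∀ y ∈ l, before x y = true) :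
    PySem.List.insertBy before x l = x :: l := by
  cases l with
  | nil => rfl
  | cons y ys => simp [PySem.List.insertBy, h y (by simp)]

-- inserting one element into the bucketed form appends it at the end of its own bucket (stability)
lemma insertBy_bucketed (N : Nat) (L : List (String × Int)) (x : String × Int)
    (h0 : 0 ≤ x.2) (hN : x.2 ≤ (N : Int)) :
    PySem.List.insertBy (fun a b => decide (b.2 < a.2)) x (bucketedP N L)
      = bucketedP N (L ++ [x]) := by
  induction N with
  | zero =>
    have hx : x.2 = 0 := le_antisymm (by exact_mod_cast hN) h0
    simp only [bucketedP]
    rw [PySem.List.insertBy_of_forall_not_before]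
    · simp [List.filter_append, List.filter, hx]
    · intro y hy
      have := (beq_iff_eq.mp (List.mem_filter.mp hy).2)
      simp [this, hx]
  | succ n ih =>
    by_cases hc : x.2 ≤ (n : Int)
    · -- x belongs to a lower bucket: skip the top bucket, insert below
      simp only [bucketedP]
      rw [insertBy_append_left _ _ _ _ ?_, ih hc]
      · have hne : (x.2 == ((n : Int) + 1)) = false := by simp; push_cast at hc; omega
        simp [List.filter_append, List.filter, hne]
      · intro y hy
        have := (beq_iff_eq.mp (List.mem_filter.mp hy).2)
        simp [this]; push_cast at hc ⊢; omega
    · -- x has the top count: it goes right after the existing top bucket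
      have hx : x.2 = ((n + 1 : Nat) : Int) := by push_cast at hN hc ⊢; omega
      simp only [bucketedP]
      rw [insertBy_append_left _ _ _ _ ?_]
      · rw [insertBy_head _ _ _ ?_]
        · rw [bucketedP_append_of_gt (by rw [hx]; push_cast; omega)]
          simp [List.filter_append, List.filter, hx]
        · intro y hy
          have := (mem_bucketedP hy).2
          simp [hx]; push_cast at this ⊢; omega
      · intro y hy
        have := (beq_iff_eq.mp (List.mem_filter.mp hy).2)
        simp [this, hx]

lemma foldl_insertBy_bucketed (N : Nat) (L P : List (String × Int))
    (h : ∀ p ∈ L, 0 ≤ p.2 ∧ p.2 ≤ (N : Int)) :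
    L.foldl (fun acc x => PySem.List.insertBy (fun a b => decide (b.2 < a.2)) x acc) (bucketedP N P)
      = bucketedP N (P ++ L) := by
  induction L generalizing P with
  | nil => simp
  | cons x xs ih =>
    simp only [List.foldl_cons]
    rw [insertBy_bucketed N P x (h x (by simp)).1 (h x (by simp)).2,
        ih (P ++ [x]) (fun p hp => h p (by simp [hp]))]
    simp

-- the stable descending sort of a bounded-key pair list IS the bucket concatenation
lemma sorted_eq_bucketed (N : Nat) (L : List (String × Int))
    (h : ∀ p ∈ L, 0 ≤ p.2 ∧ p.2 ≤ (N : Int)) :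
    PySem.List.sorted L (fun x => x.2) true = bucketedP N L := by
  rw [PySem.List.sorted_rev_eq_foldl_insertBy]
  have := foldl_insertBy_bucketed N L [] h
  rw [bucketedP_nil] at this
  simpa using this

-- B computes the same count as A: intersecting with the raw character list equals
-- intersecting with its dedup (membership is the same)
lemma inter_ofList_right {s : PySem.Set Char} (l : List Char) :
    PySem.Set.inter s (PySem.Set.ofList l) = PySem.Set.inter s l := by
  unfold PySem.Set.inter
  apply List.filter_congr
  intro x _
  simp [PySem.Set.contains, PySem.Set.mem_ofList]

lemma cnt_le (target item : String) : pvCnt target item ≤ (PySem.Set.ofList target.toList).length := by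
  unfold pvCnt PySem.Set.inter
  exact List.length_filter_le _ _

-- modify on a range-indexed table rewrites one cell
lemma modify_map_range {β : Type} (n i : Nat) (f : Nat → β) (g : β → β) :
    ((List.range n).map f).modify i g = (List.range n).map (fun c => if c = i then g (f c) else f c) := by
  apply List.ext_getElem
  · simp [List.length_modify]
  · intro j h1 h2
    simp only [List.length_modify, List.length_map, List.length_range] at h1
    rw [List.getElem_modify]
    simp [List.getElem_map, List.getElem_range, eq_comm]

-- the bucket table after B's loop: cell c holds exactly the kept items of count c, in order
lemma buckets_foldl (target : String) (threshold : Int) (m : Nat)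
    (items P : List String) :
    items.foldl (fun bs item =>
        if ((pvCnt target item : Nat) : Int) > threshold then
          bs.modify (pvCnt target item) (fun b => b ++ [item]) else bs)
      ((List.range (m + 1)).map (fun c =>
        P.filter (fun it => decide (((pvCnt target it : Nat) : Int) > threshold) && ((pvCnt target it : Nat) == c))))
    = (List.range (m + 1)).map (fun c =>
        (P ++ items).filter (fun it => decide (((pvCnt target it : Nat) : Int) > threshold) && ((pvCnt target it : Nat) == c))) := by
  induction items generalizing P with
  | nil => simp
  | cons item rest ih =>
    simp only [List.foldl_cons]
    by_cases hp : ((pvCnt target item : Nat) : Int) > threshold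
    · rw [if_pos hp, modify_map_range]
      have step : ∀ c, (if c = pvCnt target item then
            (P.filter (fun it => decide (((pvCnt target it : Nat) : Int) > threshold) && ((pvCnt target it : Nat) == c))) ++ [item]
            else P.filter (fun it => decide (((pvCnt target it : Nat) : Int) > threshold) && ((pvCnt target it : Nat) == c)))
            = (P ++ [item]).filter (fun it => decide (((pvCnt target it : Nat) : Int) > threshold) && ((pvCnt target it : Nat) == c)) := by
        intro c
        rw [List.filter_append]
        by_cases hc : c = pvCnt target item
        · subst hc; simp [List.filter, hp]
        · have hb : (pvCnt target item == c) = false := beq_eq_false_iff_ne.mpr (Ne.symm hc)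
          simp [List.filter, hb, hc]
      rw [List.map_congr_left (fun c _ => step c), ih (P ++ [item])]
      simp
    · rw [if_neg hp]
      have step : ∀ c, P.filter (fun it => decide (((pvCnt target it : Nat) : Int) > threshold) && ((pvCnt target it : Nat) == c))
          = (P ++ [item]).filter (fun it => decide (((pvCnt target it : Nat) : Int) > threshold) && ((pvCnt target it : Nat) == c)) := by
        intro c
        rw [List.filter_append]
        simp [List.filter, hp]
      rw [List.map_congr_left (fun c _ => step c), ih (P ++ [item])]
      simp

-- descending concatenation of a range-indexed table
lemma flatten_reverse_map_range {β : Type} (N : Nat) (f : Nat → List β) :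
    (((List.range (N + 1)).map f).reverse).flatten
      = f N ++ (match N with
                | 0 => []
                | Nat.succ n => (((List.range (n + 1)).map f).reverse).flatten) := by
  cases N with
  | zero => simp
  | succ n => rw [List.range_succ]; simp

-- one bucket level: mapping fst over the filtered pair list gives the filtered items
lemma map_fst_level (target : String) (threshold : Int) (items : List String) (c : Nat) :
    ((((items.filter (fun it => decide (((pvCnt target it : Nat) : Int) > threshold))).map
        (fun it => (it, ((pvCnt target it : Nat) : Int)))).filter (fun p => p.2 == (c : Int))).map (fun p => p.1))
      = items.filter (fun it => decide (((pvCnt target it : Nat) : Int) > threshold) && ((pvCnt target it : Nat) == c)) := by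
  rw [List.filter_map, List.map_map]
  have h1 : ((fun p : String × Int => p.1) ∘ fun it => (it, ((pvCnt target it : Nat) : Int))) = fun it => it := rfl
  rw [h1, List.map_id', List.filter_filter]
  apply List.filter_congr
  intro x _
  simp [Function.comp]
  rw [Bool.and_comm]
  simp [beq_eq_decide, Nat.cast_inj]

-- mapping fst over the bucketed pair list gives the buckets of the underlying items
lemma map_fst_bucketedP (target : String) (threshold : Int) (items : List String) (N : Nat) :
    (bucketedP N ((items.filter (fun it => decide (((pvCnt target it : Nat) : Int) > threshold))).map
        (fun it => (it, ((pvCnt target it : Nat) : Int))))).map (fun p => p.1)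
      = (((List.range (N + 1)).map (fun c =>
          items.filter (fun it => decide (((pvCnt target it : Nat) : Int) > threshold) && ((pvCnt target it : Nat) == c)))).reverse).flatten := by
  induction N with
  | zero =>
    rw [flatten_reverse_map_range]
    simp only [bucketedP]
    simpa using map_fst_level target threshold items 0
  | succ n ih =>
    rw [flatten_reverse_map_range]
    simp only [bucketedP, List.map_append, ih]
    exact congrArg₂ _ (map_fst_level target threshold items (n+1)) rfl

-- slicing commutes with map
lemma slice_map {α β : Type} (f : α → β) (xs : List α) (k : Int) :
    PySem.List.slice (xs.map f) none (some k) = (PySem.List.slice xs none (some k)).map f := by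
  simp [PySem.List.slice, PySem.List.clampIdx, List.map_take]

-- shapes of the two ports (definitional: lets inlined, pvCnt folded)
lemma A_shape (target : String) (items : List String) (k : Int) (threshold : Int) :
    get_top_k_similar_items target items k threshold
      = (PySem.List.slice (PySem.List.sorted
          (items.foldl (fun acc item =>
            if ((pvCnt target item : Nat) : Int) > threshold then
              acc ++ [(item, ((pvCnt target item : Nat) : Int))] else acc) [])
          (fun x => x.2) true) none (some k)).map (fun p => p.1) := rfl

lemma B_shape (target : String) (items : List String) (k : Int) (threshold : Int) :
    get_top_k_similar_items_alt target items k threshold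
      = PySem.List.slice
          (((items.foldl (fun bs item =>
              if (((PySem.Set.inter (PySem.Set.ofList target.toList) item.toList).length : Nat) : Int) > threshold then
                bs.modify (PySem.Set.inter (PySem.Set.ofList target.toList) item.toList).length (fun b => b ++ [item])
              else bs)
            ((List.range ((PySem.Set.ofList target.toList).length + 1)).map (fun _ => ([] : List String)))).reverse).foldl
            (fun acc bucket => acc ++ bucket) [])
          none (some k) := rfl

lemma cntB_eq (target it : String) :
    (PySem.Set.inter (PySem.Set.ofList target.toList) it.toList).length = pvCnt target it := by
  unfold pvCnt
  rw [inter_ofList_right]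

-- ===== VERDICT (by name: the statement is the Claim_ definition above) =====
theorem get_top_k_similar_items_spec : Claim_equal_get_top_k_similar_items := by
  intro target items k threshold _
  unfold Spec_get_top_k_similar_items
  rw [A_shape, B_shape]
  -- A side: the filtered pair list, its stable descending sort as buckets
  have hL : items.foldl (fun acc item =>
        if ((pvCnt target item : Nat) : Int) > threshold then
          acc ++ [(item, ((pvCnt target item : Nat) : Int))] else acc) ([] : List (String × Int))
      = (items.filter (fun it => decide (((pvCnt target it : Nat) : Int) > threshold))).map
          (fun it => (it, ((pvCnt target it : Nat) : Int))) := by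
    simpa using PySem.List.foldl_append_ite
      (p := fun item => ((pvCnt target item : Nat) : Int) > threshold)
      (f := fun item => (item, ((pvCnt target item : Nat) : Int))) items []
  have hbound : ∀ p ∈ (items.filter (fun it => decide (((pvCnt target it : Nat) : Int) > threshold))).map
        (fun it => (it, ((pvCnt target it : Nat) : Int))),
      0 ≤ p.2 ∧ p.2 ≤ (((PySem.Set.ofList target.toList).length : Nat) : Int) := by
    intro p hp
    rcases List.mem_map.mp hp with ⟨it, _, rfl⟩
    refine ⟨Int.natCast_nonneg _, ?_⟩
    show ((pvCnt target it : Nat) : Int) ≤ _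
    exact_mod_cast cnt_le target it
  rw [hL, sorted_eq_bucketed _ _ hbound, ← slice_map, map_fst_bucketedP]
  -- B side: the counting loop fills the bucket table, concatenated back-to-front
  have hstep : ∀ (bs : List (List String)) (item : String), item ∈ items →
      (if (((PySem.Set.inter (PySem.Set.ofList target.toList) item.toList).length : Nat) : Int) > threshold then
        bs.modify (PySem.Set.inter (PySem.Set.ofList target.toList) item.toList).length (fun b => b ++ [item])
      else bs)
      = (if ((pvCnt target item : Nat) : Int) > threshold then
          bs.modify (pvCnt target item) (fun b => b ++ [item]) else bs) := by
    intro bs item _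
    rw [cntB_eq]
  have hfold := PySem.List.foldl_congr_mem items _ _
    ((List.range ((PySem.Set.ofList target.toList).length + 1)).map (fun _ => ([] : List String))) hstep
  rw [hfold]
  have h0 : (List.range ((PySem.Set.ofList target.toList).length + 1)).map (fun _ => ([] : List String))
      = (List.range ((PySem.Set.ofList target.toList).length + 1)).map (fun c =>
          ([] : List String).filter (fun it => decide (((pvCnt target it : Nat) : Int) > threshold) && ((pvCnt target it : Nat) == c))) := by
    simp
  rw [h0, buckets_foldl target threshold _ items [],
      PySem.List.foldl_append_eq_flatten]
  simp
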